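-- pv_equiv track=rewrite | github.com/StanSStanman/lfp_causal | lfp_causal/meso/stat_early_vs_late.py | find_val_change
-- ===== SOURCE A (Python) =====
-- def find_val_change(s_arr, t_arr=None, return_cutpoint=False):
--     if t_arr is None:
--         t_arr = s_arr.copy()
--
--     assert len(s_arr) == len(t_arr), 'source and target array should ' \
--                                      'have the same dimensions'
--     cut_arr = []
--     cut_p = []
--     cn = s_arr[0]
--     _i = 0
--     n = len(s_arr)
--     for i in range(n):
--         nn = s_arr[i]
--         if nn != cn:
--             cn = nn
--             cut_arr.append(t_arr[_i:i])
--             cut_p.append(i)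
--             _i = i
--         elif nn == cn:
--             continue
--     cut_arr.append(t_arr[_i:i + 1])
--     cut_p.append(i + 1)
--     if return_cutpoint:
--         return cut_arr, cut_p
--     elif not return_cutpoint:
--         return cut_arr
-- ===== SOURCE B (Python) =====
-- def find_val_change(s_arr, t_arr=None, return_cutpoint=False):
--     if t_arr is None:
--         t_arr = s_arr.copy()
--
--     assert len(s_arr) == len(t_arr), 'source and target array should ' \
--                                      'have the same dimensions'
--     n = len(s_arr)
--     change = [i for i in range(1, n) if s_arr[i] != s_arr[i - 1]]
--     bounds = [0] + change + [n]
--     cut_arr = [t_arr[a:b] for a, b in zip(bounds, bounds[1:])]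
--     if return_cutpoint:
--         return cut_arr, change + [n]
--     return cut_arr
-- ===== Notes on version B (the rewrite author's own statement) =====
-- stated objective: simpler
-- what changed: B replaces A's single stateful loop (tracking current value, last cut index and two accumulators) by a stateless decomposition: one comprehension collecting the change indices, then slicing t_arr between consecutive boundaries via zip.
-- outside the precondition, e.g. on find_val_change([1, 2], None, True): A returns [[[1], [2]], [1, 2]], B returns [[[1], [2]], [1, 2]]
import Mathlib
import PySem

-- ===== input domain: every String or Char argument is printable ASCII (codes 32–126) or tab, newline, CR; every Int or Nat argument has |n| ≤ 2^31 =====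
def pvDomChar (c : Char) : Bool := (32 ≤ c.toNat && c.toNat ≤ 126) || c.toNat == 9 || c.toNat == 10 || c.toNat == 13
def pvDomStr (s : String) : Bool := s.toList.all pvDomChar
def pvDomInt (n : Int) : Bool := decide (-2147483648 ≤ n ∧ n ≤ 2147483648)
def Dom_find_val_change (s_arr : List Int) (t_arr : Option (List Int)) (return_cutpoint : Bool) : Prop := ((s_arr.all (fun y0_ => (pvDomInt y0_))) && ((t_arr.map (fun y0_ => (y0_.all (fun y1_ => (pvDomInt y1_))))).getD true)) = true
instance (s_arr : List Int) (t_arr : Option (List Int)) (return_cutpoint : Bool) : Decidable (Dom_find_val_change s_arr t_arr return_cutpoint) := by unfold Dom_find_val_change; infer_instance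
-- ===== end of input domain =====

-- B replaces A's stateful loop by collecting change indices and slicing between consecutive
-- boundaries (a different decomposition, not faster). Equality of RETURN values is proved on
-- Pre_: nonempty s_arr, matching lengths, return_cutpoint = false.

-- ===== PORT A =====
-- Literal transliteration of A. The loop is a foldl over range(0, n) threading the state
-- (cut_arr, cut_p, cn, _i); the leftover loop variable i equals n - 1 (Pre_ gives s_arr ≠ []).
def find_val_change (s_arr : List Int) (t_arr : Option (List Int)) (return_cutpoint : Bool) : List (List Int) :=
  let t := t_arr.getD s_arr                      -- if t_arr is None: t_arr = s_arr.copy()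
  -- assert len(s_arr) == len(t_arr): AssertionError excluded by Pre_
  let n : Int := s_arr.length
  let st := (PySem.List.pyRange 0 n 1).foldl
    (fun (st : List (List Int) × List Int × Int × Int) i =>
      -- nn = s_arr[i], in range for i ∈ range(n)
      if PySem.List.pyGetD s_arr i 0 ≠ st.2.2.1 then
        (st.1 ++ [PySem.List.slice t (some st.2.2.2) (some i)], st.2.1 ++ [i],
         PySem.List.pyGetD s_arr i 0, i)
      else st)
    ([], [], PySem.List.pyGetD s_arr 0 0, 0)     -- cn = s_arr[0]: IndexError on [] excluded by Pre_
  let i : Int := n - 1                            -- leftover loop variable (n ≥ 1 under Pre_)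
  let cut_arr := st.1 ++ [PySem.List.slice t (some st.2.2.2) (some (i + 1))]
  -- return_cutpoint = True returns the tuple (cut_arr, cut_p), not a List (List Int): excluded by Pre_
  cut_arr

-- ===== PORT B =====
def find_val_change_alt (s_arr : List Int) (t_arr : Option (List Int)) (return_cutpoint : Bool) : List (List Int) :=
  let t := t_arr.getD s_arr
  let n : Int := s_arr.length
  let change := (PySem.List.pyRange 1 n 1).filter
    (fun i => PySem.List.pyGetD s_arr i 0 ≠ PySem.List.pyGetD s_arr (i - 1) 0)
  let bounds := (0 :: change) ++ [n]
  (bounds.zip bounds.tail).map (fun p => PySem.List.slice t (some p.1) (some p.2))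

-- ===== PRECONDITION & SPEC =====
-- Pre_ excludes: empty s_arr (A raises IndexError at s_arr[0]); an explicit t_arr of a different
-- length (AssertionError); and return_cutpoint = True, where A returns a TUPLE (cut_arr, cut_p),
-- which is not a value of the declared return type List (List Int).
def Pre_find_val_change (s_arr : List Int) (t_arr : Option (List Int)) (return_cutpoint : Bool) : Prop :=
  s_arr ≠ [] ∧ return_cutpoint = false ∧ (∀ t ∈ t_arr, t.length = s_arr.length)
instance (s_arr : List Int) (t_arr : Option (List Int)) (return_cutpoint : Bool) : Decidable (Pre_find_val_change s_arr t_arr return_cutpoint) := by unfold Pre_find_val_change; infer_instance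

def pvWitness_find_val_change : List Int × Option (List Int) × Bool := ([1, 1, 2], some [4, 5, 6], false)

def Spec_find_val_change (s_arr : List Int) (t_arr : Option (List Int)) (return_cutpoint : Bool) (out : List (List Int)) : Prop := out = find_val_change_alt s_arr t_arr return_cutpoint
instance (s_arr : List Int) (t_arr : Option (List Int)) (return_cutpoint : Bool) (out : List (List Int)) : Decidable (Spec_find_val_change s_arr t_arr return_cutpoint out) := by unfold Spec_find_val_change; infer_instance

-- ===== CLAIM (what is proved, stated in full; the proofs are below) =====
def Claim_equal_find_val_change : Prop := ∀ (s_arr : List Int) (t_arr : Option (List Int)) (return_cutpoint : Bool), Dom_find_val_change s_arr t_arr return_cutpoint → Pre_find_val_change s_arr t_arr return_cutpoint → Spec_find_val_change s_arr t_arr return_cutpoint (find_val_change s_arr t_arr return_cutpoint)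

-- ===== LEMMAS AND PROOFS =====

-- slices of t between consecutive members of a boundary list
def pvSeg (t : List Int) (bs : List Int) : List (List Int) :=
  (bs.zip bs.tail).map (fun p => PySem.List.slice t (some p.1) (some p.2))

-- the change-index list of B, starting the scan at index a
def pvChg (s : List Int) (a : Int) : List Int :=
  (PySem.List.pyRange a s.length 1).filter
    (fun i => PySem.List.pyGetD s i 0 ≠ PySem.List.pyGetD s (i - 1) 0)

lemma pvSeg_append_last (t : List Int) (x : Int) (xs : List Int) (m : Int) :
    pvSeg t ((x :: xs) ++ [m])
      = pvSeg t (x :: xs) ++ [PySem.List.slice t (some (xs.getLastD x)) (some m)] := by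
  induction xs generalizing x with
  | nil => rfl
  | cons y ys ih =>
    rw [List.getLastD_cons]
    simpa [pvSeg] using ih y

-- A's loop, entered at index a with cn = s[a-1] and _i = p, produces B's segments of the
-- remaining change indices.
lemma pvLoop (s t : List Int) (k : Nat) :
    ∀ (a : Int) (ca : List (List Int)) (cp : List Int) (p : Int),
      1 ≤ a → a + k = (s.length : Int) →
      (PySem.List.pyRange a s.length 1).foldl
        (fun (st : List (List Int) × List Int × Int × Int) i =>
          if PySem.List.pyGetD s i 0 ≠ st.2.2.1 then
            (st.1 ++ [PySem.List.slice t (some st.2.2.2) (some i)], st.2.1 ++ [i],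
             PySem.List.pyGetD s i 0, i)
          else st)
        (ca, cp, PySem.List.pyGetD s (a - 1) 0, p)
      = (ca ++ pvSeg t (p :: pvChg s a), cp ++ pvChg s a,
         PySem.List.pyGetD s ((s.length : Int) - 1) 0, (pvChg s a).getLastD p) := by
  induction k with
  | zero =>
    intro a ca cp p h1 h2
    have ha : a = (s.length : Int) := by omega
    subst ha
    rw [pvChg, PySem.List.pyRange_one_eq_nil (by omega)]
    simp [pvSeg]
  | succ k ih =>
    intro a ca cp p h1 h2
    have hlt : a < (s.length : Int) := by omega
    rw [pvChg, PySem.List.pyRange_one_cons hlt, List.foldl_cons]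
    by_cases hne : PySem.List.pyGetD s a 0 ≠ PySem.List.pyGetD s (a - 1) 0
    · rw [if_pos hne, List.filter_cons_of_pos (by simpa using hne)]
      rw [show (PySem.List.pyRange (a + 1) (s.length : Int) 1).filter
            (fun i => decide (PySem.List.pyGetD s i 0 ≠ PySem.List.pyGetD s (i - 1) 0))
            = pvChg s (a + 1) from rfl]
      rw [show PySem.List.pyGetD s a 0 = PySem.List.pyGetD s (a + 1 - 1) 0 by norm_num]
      rw [ih (a + 1) (ca ++ [PySem.List.slice t (some p) (some a)]) (cp ++ [a]) a
            (by omega) (by omega)]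
      rw [List.getLastD_cons]
      simp [pvSeg]
    · rw [if_neg hne, List.filter_cons_of_neg (by simpa using hne)]
      have heq : PySem.List.pyGetD s a 0 = PySem.List.pyGetD s (a - 1) 0 := not_ne_iff.mp hne
      rw [show PySem.List.pyGetD s (a - 1) 0 = PySem.List.pyGetD s (a + 1 - 1) 0 by
            rw [show a + 1 - 1 = a by ring]; exact heq.symm]
      rw [ih (a + 1) ca cp p (by omega) (by omega)]
      rfl

-- ===== VERDICT (by name: the statement is the Claim_ definition above) =====
theorem find_val_change_spec : Claim_equal_find_val_change := by
  intro s_arr t_arr return_cutpoint _ hpre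
  obtain ⟨hne, hrc, -⟩ := hpre
  have hl : 0 < s_arr.length := List.length_pos_iff.mpr hne
  have hlen : (0 : Int) < (s_arr.length : Int) := by omega
  unfold Spec_find_val_change find_val_change find_val_change_alt
  dsimp only
  rw [PySem.List.pyRange_one_cons hlen, List.foldl_cons]
  rw [if_neg (by simp)]
  rw [show (0 : Int) + 1 = 1 by norm_num]
  rw [show PySem.List.pyGetD s_arr (0 : Int) 0 = PySem.List.pyGetD s_arr ((1 : Int) - 1) 0 by
        norm_num]
  rw [pvLoop s_arr (t_arr.getD s_arr) (s_arr.length - 1) 1 [] [] 0 (by omega) (by omega)]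
  rw [show ((s_arr.length : Int) - 1) + 1 = (s_arr.length : Int) by ring]
  show _ = pvSeg (t_arr.getD s_arr) ((0 :: pvChg s_arr 1) ++ [(s_arr.length : Int)])
  rw [pvSeg_append_last]
  simp
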